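-- pv_equiv track=rewrite | github.com/ndlib/marble-manifest-pipeline | metadata_rules/harvest_metadata_rules.py | _get_json_from_sheet_contents_list
-- ===== SOURCE A (Python) =====
-- def _get_json_from_sheet_contents_list(sheet_contents_list: list, columns_to_export: list, field_name_for_key: str) -> dict:
--     """ Convert sheet_contents_list to json """
--     json_node = {}
--     for column_name in columns_to_export:
--         column_name = column_name.lower()
--     if sheet_contents_list:
--         for i, row in enumerate(sheet_contents_list):
--             if i == 0:
--                 field_names_list = row
--             else:
--                 this_row = {}
--                 j = 0
--                 key = ""
--                 while j < len(row):
--                     field_name = field_names_list[j].lower()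
--                     if field_name in columns_to_export:
--                         if field_name == field_name_for_key:
--                             key = row[j].strip()
--                         else:
--                             this_row[field_name] = row[j].strip()
--                     j += 1
--                 if key:
--                     json_node[key] = this_row
--     return json_node
-- ===== SOURCE B (Python) =====
-- def _get_json_from_sheet_contents_list(sheet_contents_list: list, columns_to_export: list, field_name_for_key: str) -> dict:
--     """Convert sheet_contents_list to json: precompile the selected columns from the
--     header once, then per data row touch only those column positions."""
--     json_node = {}
--     if not sheet_contents_list:
--         return json_node
--     header = sheet_contents_list[0]
--     selected = []
--     for j in range(len(header)):
--         lname = header[j].lower()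
--         if lname in columns_to_export:
--             selected.append((j, lname, lname == field_name_for_key))
--     for row in sheet_contents_list[1:]:
--         this_row = {}
--         key = ""
--         for j, lname, is_key in selected:
--             if j < len(row):
--                 if is_key:
--                     key = row[j].strip()
--                 else:
--                     this_row[lname] = row[j].strip()
--         if key:
--             json_node[key] = this_row
--     return json_node
-- ===== Notes on version B (the rewrite author's own statement) =====
-- stated objective: faster
-- what changed: B precompiles from the header a list of selected (index, lowered name, is-key) columns once and then per data row iterates only over that short list with a bounds guard, instead of A's per-row scan over every cell with a header lookup, lowercasing and a membership test at each cell; A's dead lowercasing loop over columns_to_export is dropped.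
import Mathlib
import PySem

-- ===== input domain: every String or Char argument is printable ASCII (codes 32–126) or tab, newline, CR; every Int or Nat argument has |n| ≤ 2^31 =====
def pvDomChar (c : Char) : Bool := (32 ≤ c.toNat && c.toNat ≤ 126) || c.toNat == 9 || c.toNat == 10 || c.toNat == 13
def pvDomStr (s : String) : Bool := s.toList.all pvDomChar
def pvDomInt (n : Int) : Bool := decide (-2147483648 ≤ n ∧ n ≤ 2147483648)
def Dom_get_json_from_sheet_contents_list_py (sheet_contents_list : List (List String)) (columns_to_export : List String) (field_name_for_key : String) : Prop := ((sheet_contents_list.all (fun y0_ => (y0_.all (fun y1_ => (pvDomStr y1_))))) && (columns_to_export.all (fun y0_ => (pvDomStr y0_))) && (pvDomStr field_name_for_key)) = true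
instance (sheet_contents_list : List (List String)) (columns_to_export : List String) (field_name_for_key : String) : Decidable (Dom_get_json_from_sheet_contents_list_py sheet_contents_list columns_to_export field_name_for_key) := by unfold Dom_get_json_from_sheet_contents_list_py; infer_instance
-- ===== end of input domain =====

-- B precompiles the selected (index, name, is-key) columns from the header once and per data
-- row touches only those positions, instead of A's per-cell header lookup + membership test.

-- ===== PORT A =====
def get_json_from_sheet_contents_list_py (sheet_contents_list : List (List String)) (columns_to_export : List String) (field_name_for_key : String) : List (String × List (String × String)) :=
  -- dead loop 'for column_name in columns_to_export: column_name = column_name.lower()'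
  let _dead := columns_to_export.foldl (fun _ c => PySem.Str.lower c) ""
  match sheet_contents_list with
  | [] => []
  | field_names_list :: rest =>
    (rest.foldl (fun (json_node : PySem.Dict String (List (String × String))) row =>
        -- while j < len(row): … j += 1   (counter loop = range(len(row)))
        let st := (PySem.List.pyRange 0 (PySem.List.len row) 1).foldl
          (fun (st : PySem.Dict String String × String) j =>
            let field_name := PySem.Str.lower (PySem.List.pyGetD field_names_list j "")
            if columns_to_export.contains field_name then
              if field_name == field_name_for_key then
                (st.1, PySem.Str.strip (PySem.List.pyGetD row j ""))
              else
                (st.1.insert field_name (PySem.Str.strip (PySem.List.pyGetD row j "")), st.2)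
            else st)
          (PySem.Dict.empty, "")
        if st.2 == "" then json_node else json_node.insert st.2 st.1.items)
      PySem.Dict.empty).items

-- ===== PORT B =====
def get_json_from_sheet_contents_list_py_alt (sheet_contents_list : List (List String)) (columns_to_export : List String) (field_name_for_key : String) : List (String × List (String × String)) :=
  match sheet_contents_list with
  | [] => []
  | header :: rest =>
    -- compile the selected columns from the header once
    let selected : List (Int × String × Bool) :=
      (PySem.List.pyRange 0 (PySem.List.len header) 1).foldl
        (fun acc j =>
          let lname := PySem.Str.lower (PySem.List.pyGetD header j "")
          if columns_to_export.contains lname then acc ++ [(j, lname, lname == field_name_for_key)]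
          else acc) []
    (rest.foldl (fun (json_node : PySem.Dict String (List (String × String))) row =>
        let st := selected.foldl
          (fun (st : PySem.Dict String String × String) t =>
            if t.1 < PySem.List.len row then
              if t.2.2 then (st.1, PySem.Str.strip (PySem.List.pyGetD row t.1 ""))
              else (st.1.insert t.2.1 (PySem.Str.strip (PySem.List.pyGetD row t.1 "")), st.2)
            else st)
          (PySem.Dict.empty, "")
        if st.2 == "" then json_node else json_node.insert st.2 st.1.items)
      PySem.Dict.empty).items

-- ===== PRECONDITION & SPEC =====
-- Pre_ excludes exactly the inputs where A raises IndexError: a data row longer than the header row.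
def Pre_get_json_from_sheet_contents_list_py (sheet_contents_list : List (List String)) (columns_to_export : List String) (field_name_for_key : String) : Prop :=
  ∀ row ∈ sheet_contents_list.drop 1, row.length ≤ (sheet_contents_list.headD []).length
instance (sheet_contents_list : List (List String)) (columns_to_export : List String) (field_name_for_key : String) : Decidable (Pre_get_json_from_sheet_contents_list_py sheet_contents_list columns_to_export field_name_for_key) := by unfold Pre_get_json_from_sheet_contents_list_py; infer_instance

def pvWitness_get_json_from_sheet_contents_list_py : List (List String) × List String × String :=
  ([["id", "name"], [" 1 ", "a"], ["2", "b"]], ["id", "name"], "id")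

def Spec_get_json_from_sheet_contents_list_py (sheet_contents_list : List (List String)) (columns_to_export : List String) (field_name_for_key : String) (out : List (String × List (String × String))) : Prop := out = get_json_from_sheet_contents_list_py_alt sheet_contents_list columns_to_export field_name_for_key
instance (sheet_contents_list : List (List String)) (columns_to_export : List String) (field_name_for_key : String) (out : List (String × List (String × String))) : Decidable (Spec_get_json_from_sheet_contents_list_py sheet_contents_list columns_to_export field_name_for_key out) := by unfold Spec_get_json_from_sheet_contents_list_py; infer_instance

-- ===== CLAIM =====
def Claim_equal_get_json_from_sheet_contents_list_py : Prop := ∀ (sheet_contents_list : List (List String)) (columns_to_export : List String) (field_name_for_key : String), Dom_get_json_from_sheet_contents_list_py sheet_contents_list columns_to_export field_name_for_key → Pre_get_json_from_sheet_contents_list_py sheet_contents_list columns_to_export field_name_for_key → Spec_get_json_from_sheet_contents_list_py sheet_contents_list columns_to_export field_name_for_key (get_json_from_sheet_contents_list_py sheet_contents_list columns_to_export field_name_for_key)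


-- ===== LEMMAS AND PROOFS =====

-- filtering range(0,n) by (< m) gives range(0,m) when 0 ≤ m ≤ n
lemma pv_filter_range (n m : Int) (h0 : 0 ≤ m) (hmn : m ≤ n) :
    (PySem.List.pyRange 0 n 1).filter (fun j => decide (j < m)) = PySem.List.pyRange 0 m 1 := by
  rw [PySem.List.pyRange_one_append 0 m n h0 hmn, List.filter_append]
  have h1 : (PySem.List.pyRange 0 m 1).filter (fun j => decide (j < m)) = PySem.List.pyRange 0 m 1 := by
    apply List.filter_eq_self.mpr
    intro j hj
    exact decide_eq_true (PySem.List.mem_pyRange_one.mp hj).2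
  have h2 : (PySem.List.pyRange m n 1).filter (fun j => decide (j < m)) = [] := by
    apply List.filter_eq_nil_iff.mpr
    intro j hj
    simp [(PySem.List.mem_pyRange_one.mp hj).1, not_lt.mpr]
  rw [h1, h2, List.append_nil]

-- per-row: A's inline filter/route loop = B's loop over the precompiled selected columns
lemma pv_row (cols : List String) (fkey : String) (header row : List String)
    (hle : row.length ≤ header.length) :
    (PySem.List.pyRange 0 (PySem.List.len row) 1).foldl
      (fun (st : PySem.Dict String String × String) j =>
        let field_name := PySem.Str.lower (PySem.List.pyGetD header j "")
        if cols.contains field_name then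
          if field_name == fkey then (st.1, PySem.Str.strip (PySem.List.pyGetD row j ""))
          else (st.1.insert field_name (PySem.Str.strip (PySem.List.pyGetD row j "")), st.2)
        else st)
      (PySem.Dict.empty, "")
    = ((PySem.List.pyRange 0 (PySem.List.len header) 1).foldl
        (fun (acc : List (Int × String × Bool)) j =>
          let lname := PySem.Str.lower (PySem.List.pyGetD header j "")
          if cols.contains lname then acc ++ [(j, lname, lname == fkey)] else acc) []).foldl
        (fun (st : PySem.Dict String String × String) t =>
          if t.1 < PySem.List.len row then
            if t.2.2 then (st.1, PySem.Str.strip (PySem.List.pyGetD row t.1 ""))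
            else (st.1.insert t.2.1 (PySem.Str.strip (PySem.List.pyGetD row t.1 "")), st.2)
          else st)
        (PySem.Dict.empty, "") := by
  -- abbreviations
  set p : Int → Bool := fun j => cols.contains (PySem.Str.lower (PySem.List.pyGetD header j "")) with hp
  set h : (PySem.Dict String String × String) → Int → (PySem.Dict String String × String) :=
    fun st j =>
      if PySem.Str.lower (PySem.List.pyGetD header j "") == fkey then
        (st.1, PySem.Str.strip (PySem.List.pyGetD row j ""))
      else
        (st.1.insert (PySem.Str.lower (PySem.List.pyGetD header j ""))
          (PySem.Str.strip (PySem.List.pyGetD row j "")), st.2) with hh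
  -- A side: fold with if = fold over filter
  have hA : (PySem.List.pyRange 0 (PySem.List.len row) 1).foldl
      (fun (st : PySem.Dict String String × String) j =>
        let field_name := PySem.Str.lower (PySem.List.pyGetD header j "")
        if cols.contains field_name then
          if field_name == fkey then (st.1, PySem.Str.strip (PySem.List.pyGetD row j ""))
          else (st.1.insert field_name (PySem.Str.strip (PySem.List.pyGetD row j "")), st.2)
        else st)
      (PySem.Dict.empty, "")
      = ((PySem.List.pyRange 0 (PySem.List.len row) 1).filter p).foldl h (PySem.Dict.empty, "") := by
    rw [← PySem.List.foldl_if_eq_foldl_filter]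
  -- B side: the append-if fold builds a filtered map of the header range
  have hSel : ((PySem.List.pyRange 0 (PySem.List.len header) 1).foldl
      (fun (acc : List (Int × String × Bool)) j =>
        let lname := PySem.Str.lower (PySem.List.pyGetD header j "")
        if cols.contains lname then acc ++ [(j, lname, lname == fkey)] else acc) [])
      = ((PySem.List.pyRange 0 (PySem.List.len header) 1).filter p).map
          (fun j => (j, PySem.Str.lower (PySem.List.pyGetD header j ""),
            PySem.Str.lower (PySem.List.pyGetD header j "") == fkey)) := by
    rw [PySem.List.foldl_append_if p
      (fun j => (j, PySem.Str.lower (PySem.List.pyGetD header j ""),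
        PySem.Str.lower (PySem.List.pyGetD header j "") == fkey))]
    rfl
  rw [hA, hSel, List.foldl_map]
  -- B's guarded body over the mapped triple = the h body guarded by j < len row
  have hBody : (fun (st : PySem.Dict String String × String) (j : Int) =>
      if j < PySem.List.len row then
        if (PySem.Str.lower (PySem.List.pyGetD header j "") == fkey) = true then
          (st.1, PySem.Str.strip (PySem.List.pyGetD row j ""))
        else (st.1.insert (PySem.Str.lower (PySem.List.pyGetD header j ""))
          (PySem.Str.strip (PySem.List.pyGetD row j "")), st.2)
      else st)
      = (fun st j => if decide (j < PySem.List.len row) = true then h st j else st) := by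
    funext st j
    by_cases hj : j < PySem.List.len row <;> simp [hj, hh]
  show ((PySem.List.pyRange 0 (PySem.List.len row) 1).filter p).foldl h (PySem.Dict.empty, "")
      = ((PySem.List.pyRange 0 (PySem.List.len header) 1).filter p).foldl
          (fun st j =>
            if j < PySem.List.len row then
              if (PySem.Str.lower (PySem.List.pyGetD header j "") == fkey) = true then
                (st.1, PySem.Str.strip (PySem.List.pyGetD row j ""))
              else (st.1.insert (PySem.Str.lower (PySem.List.pyGetD header j ""))
                (PySem.Str.strip (PySem.List.pyGetD row j "")), st.2)
            else st)
          (PySem.Dict.empty, "")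
  rw [hBody, PySem.List.foldl_if_eq_foldl_filter, List.filter_filter]
  congr 1
  have : (fun j => (decide (j < PySem.List.len row) && p j))
      = (fun j => (p j && decide (j < PySem.List.len row))) := by
    funext j; exact Bool.and_comm _ _
  rw [this, ← List.filter_filter, pv_filter_range _ _ (by simp [PySem.List.len_eq]) (by simp [PySem.List.len_eq]; exact_mod_cast hle)]

-- ===== VERDICT =====
theorem get_json_from_sheet_contents_list_py_spec : Claim_equal_get_json_from_sheet_contents_list_py := by
  intro scl cols fkey _dom pre
  unfold Spec_get_json_from_sheet_contents_list_py
  unfold get_json_from_sheet_contents_list_py get_json_from_sheet_contents_list_py_alt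
  cases scl with
  | nil => rfl
  | cons header rest =>
    simp only []
    congr 1
    apply PySem.List.foldl_congr_mem
    intro jn row hrow
    have hle : row.length ≤ header.length := pre row (by simpa using hrow)
    simp only [pv_row cols fkey header row hle]
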